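-- pv_equiv track=rewrite | github.com/wanlanli/CellMate | cellmate/patch/_utils.py | circular_sequence
-- ===== SOURCE A (Python) =====
-- def circular_sequence(start: int, end: int, max_id: int, include_end=True):
--     """
--     Generates a circular sequence from a start to an end index within a circular range.
--
--     Parameters
--     ----------
--     start : int
--         The starting index of the sequence.
--     end : int
--         The ending index of the sequence.
--     max_id : int
--         The maximum value in the circular range (inclusive).
--
--     Returns
--     -------
--     List[int]
--         A list representing the circular sequence from start to end.
--
--     Example
--     -------
--     If max_id = 10, start = 7, and end = 4, the output will be:
--     [7, 8, 9, 0, 1, 2, 3]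
--     """
--
--     sequence = []
--     end = end % max_id
--     start = start % max_id
--
--     current = start
--     while current != end:
--         sequence.append(current)
--         current = (current + 1) % (max_id)
--     if include_end:
--         sequence.append(end)  # Include the end point in the sequence
--     return sequence
-- ===== SOURCE B (Python) =====
-- def circular_sequence(start: int, end: int, max_id: int, include_end=True):
--     end = end % max_id
--     start = start % max_id
--     n = (end - start) % abs(max_id)
--     sequence = [(start + i) % max_id for i in range(n)]
--     if include_end:
--         sequence.append(end)
--     return sequence
-- ===== Notes on version B (the rewrite author's own statement) =====
-- stated objective: alternative
-- what changed: Replaces A's equality-terminated while loop with a mutable current by a closed-form step count n = (end-start) % abs(max_id) and a direct comprehension [(start+i) % max_id for i in range(n)].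
-- outside the precondition, e.g. on circular_sequence(1, 2, 0, True): A raises ZeroDivisionError, B raises ZeroDivisionError
import Mathlib
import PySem

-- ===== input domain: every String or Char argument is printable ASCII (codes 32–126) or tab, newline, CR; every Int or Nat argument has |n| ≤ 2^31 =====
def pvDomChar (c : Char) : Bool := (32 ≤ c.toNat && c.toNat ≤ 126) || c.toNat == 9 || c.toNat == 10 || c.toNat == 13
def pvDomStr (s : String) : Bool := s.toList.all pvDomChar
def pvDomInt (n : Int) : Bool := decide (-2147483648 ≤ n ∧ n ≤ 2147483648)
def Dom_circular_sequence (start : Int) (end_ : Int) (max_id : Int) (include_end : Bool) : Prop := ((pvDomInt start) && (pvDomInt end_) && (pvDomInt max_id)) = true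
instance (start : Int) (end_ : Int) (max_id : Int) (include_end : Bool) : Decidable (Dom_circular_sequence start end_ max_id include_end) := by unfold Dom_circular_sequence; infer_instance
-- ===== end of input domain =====

-- B replaces A's equality-terminated while loop and mutable `current` by a closed-form
-- step count n = (end-start) % abs(max_id) and a direct comprehension over range(n); alternative decomposition, same cost.

-- ===== PORT A =====
-- A's `while current != end` loop; fuel |max_id|+1 bounds the iteration count (the loop
-- visits pairwise-distinct residues mod max_id, so it terminates within |max_id| steps;
-- the proofs show the fuel is never exhausted when max_id ≠ 0).
def csLoopA (max_id e : Int) : Nat → Int → List Int → List Int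
  | 0, _, seq => seq
  | fuel + 1, current, seq =>
    if current = e then seq
    else csLoopA max_id e fuel (PySem.Int.mod (current + 1) max_id) (seq ++ [current])

def circular_sequence (start : Int) (end_ : Int) (max_id : Int) (include_end : Bool) : List Int :=
  let e := PySem.Int.mod end_ max_id
  let s := PySem.Int.mod start max_id
  let seq := csLoopA max_id e (max_id.natAbs + 1) s []
  if include_end then seq ++ [e] else seq

-- ===== PORT B =====
def circular_sequence_alt (start : Int) (end_ : Int) (max_id : Int) (include_end : Bool) : List Int :=
  let e := PySem.Int.mod end_ max_id
  let s := PySem.Int.mod start max_id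
  let n := PySem.Int.mod (e - s) |max_id|
  let sequence := (PySem.List.pyRange 0 n 1).map (fun i => PySem.Int.mod (s + i) max_id)
  if include_end then sequence ++ [e] else sequence

-- ===== PRECONDITION & SPEC =====
-- Pre_ excludes exactly max_id = 0, where Python A raises ZeroDivisionError at `end % max_id`.
def Pre_circular_sequence (start : Int) (end_ : Int) (max_id : Int) (include_end : Bool) : Prop := max_id ≠ 0
instance (start : Int) (end_ : Int) (max_id : Int) (include_end : Bool) : Decidable (Pre_circular_sequence start end_ max_id include_end) := by unfold Pre_circular_sequence; infer_instance

def pvWitness_circular_sequence : Int × Int × Int × Bool := (7, 4, 10, true)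

def Spec_circular_sequence (start : Int) (end_ : Int) (max_id : Int) (include_end : Bool) (out : List Int) : Prop := out = circular_sequence_alt start end_ max_id include_end
instance (start : Int) (end_ : Int) (max_id : Int) (include_end : Bool) (out : List Int) : Decidable (Spec_circular_sequence start end_ max_id include_end out) := by unfold Spec_circular_sequence; infer_instance

-- ===== CLAIM (what is proved, stated in full; the proofs are below) =====
def Claim_equal_circular_sequence : Prop := ∀ (start : Int) (end_ : Int) (max_id : Int) (include_end : Bool), Dom_circular_sequence start end_ max_id include_end → Pre_circular_sequence start end_ max_id include_end → Spec_circular_sequence start end_ max_id include_end (circular_sequence start end_ max_id include_end)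

-- ===== LEMMAS AND PROOFS =====

-- PySem.Int.mod is congruent modulo the divisor, and values in the divisor-sign range are fixed points.
theorem pv_mod_dvd_sub (a m : Int) : m ∣ (a - PySem.Int.mod a m) := by
  have h := PySem.Int.floordiv_mul_add_mod a m
  exact ⟨PySem.Int.floordiv a m, by linarith⟩

theorem pv_mod_congr {a b : Int} (m : Int) (hm : m ≠ 0) (h : m ∣ (a - b)) :
    PySem.Int.mod a m = PySem.Int.mod b m := by
  have ha := pv_mod_dvd_sub a m
  have hb := pv_mod_dvd_sub b m
  have hd : m ∣ (PySem.Int.mod a m - PySem.Int.mod b m) := by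
    have : PySem.Int.mod a m - PySem.Int.mod b m = (a - b) - (a - PySem.Int.mod a m) + (b - PySem.Int.mod b m) := by ring
    rw [this]
    exact dvd_add (dvd_sub h ha) hb
  have hz : PySem.Int.mod a m - PySem.Int.mod b m = 0 := by
    apply Int.eq_zero_of_dvd_of_natAbs_lt_natAbs hd
    rcases lt_or_gt_of_ne hm with hneg | hpos
    · have b1 := PySem.Int.mod_neg_bounds (a := a) hneg
      have b2 := PySem.Int.mod_neg_bounds (a := b) hneg
      omega
    · have a1 := PySem.Int.mod_nonneg (a := a) hpos
      have a2 := PySem.Int.mod_lt (a := a) hpos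
      have b1 := PySem.Int.mod_nonneg (a := b) hpos
      have b2 := PySem.Int.mod_lt (a := b) hpos
      omega
  omega

theorem pv_mod_idem (a m : Int) (hm : m ≠ 0) :
    PySem.Int.mod (PySem.Int.mod a m) m = PySem.Int.mod a m :=
  pv_mod_congr m hm (by simpa [neg_sub] using (pv_mod_dvd_sub a m).neg_right)

theorem pv_mod_self_of_range (x m : Int)
    (h : (0 < m ∧ 0 ≤ x ∧ x < m) ∨ (m < 0 ∧ m < x ∧ x ≤ 0)) :
    PySem.Int.mod x m = x := by
  have hd : m ∣ (PySem.Int.mod x m - x) := by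
    have := pv_mod_dvd_sub x m
    simpa using this.neg_right
  have hz : PySem.Int.mod x m - x = 0 := by
    apply Int.eq_zero_of_dvd_of_natAbs_lt_natAbs hd
    rcases h with ⟨hpos, h0, h1⟩ | ⟨hneg, h0, h1⟩
    · have a1 := PySem.Int.mod_nonneg (a := x) hpos
      have a2 := PySem.Int.mod_lt (a := x) hpos
      omega
    · have b1 := PySem.Int.mod_neg_bounds (a := x) hneg
      omega
  omega

-- The loop from a residue `cur`, with step count k = (e - cur) % |m| and enough fuel,
-- appends exactly the k successive residues (cur + i) % m.
theorem csLoopA_eq (m e : Int) (hm : m ≠ 0) (he : PySem.Int.mod e m = e) :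
    ∀ (k fuel : Nat) (cur : Int), PySem.Int.mod cur m = cur →
      PySem.Int.mod (e - cur) |m| = (k : Int) → k < fuel → ∀ (seq : List Int),
      csLoopA m e fuel cur seq = seq ++ (List.range k).map (fun (i : Nat) => PySem.Int.mod (cur + (i : Int)) m)
  | 0, fuel, cur, hc, hk, hf, seq => by
    have habs : |m| ≠ 0 := by simpa using hm
    have hdvd : m ∣ (e - cur) := by
      have : |m| ∣ (e - cur) := by
        have := pv_mod_dvd_sub (e - cur) |m|
        simpa [hk] using this
      exact (abs_dvd m (e - cur)).1 this
    have : e = cur := by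
      have := pv_mod_congr (a := e) (b := cur) m hm hdvd
      rw [he, hc] at this; omega
    obtain ⟨f, rfl⟩ : ∃ f, fuel = f + 1 := ⟨fuel - 1, by omega⟩
    subst this
    simp [csLoopA]
  | k + 1, fuel, cur, hc, hk, hf, seq => by
    obtain ⟨f, rfl⟩ : ∃ f, fuel = f + 1 := ⟨fuel - 1, by omega⟩
    have habs0 : (0:Int) < |m| := by
      rcases lt_or_gt_of_ne hm with h | h
      · simp [abs_of_neg, h]
      · simp [abs_of_pos, h]
    have hne : cur ≠ e := by
      intro hcontra
      rw [hcontra, sub_self] at hk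
      have : PySem.Int.mod 0 |m| = 0 := by
        apply pv_mod_self_of_range
        left; exact ⟨habs0, le_refl 0, habs0⟩
      omega
    have hcur' : PySem.Int.mod (PySem.Int.mod (cur + 1) m) m = PySem.Int.mod (cur + 1) m :=
      pv_mod_idem (cur + 1) m hm
    have hk' : PySem.Int.mod (e - PySem.Int.mod (cur + 1) m) |m| = (k : Int) := by
      have hklt : ((k : Int) + 1) < |m| := by
        have := PySem.Int.mod_lt (a := e - cur) (b := |m|) habs0
        omega
      have hdvd1 : |m| ∣ ((e - cur) - ((k : Int) + 1)) := by
        have := pv_mod_dvd_sub (e - cur) |m|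
        simpa [hk] using this
      have hdvd2 : m ∣ ((cur + 1) - PySem.Int.mod (cur + 1) m) := pv_mod_dvd_sub (cur + 1) m
      have hdvd2' : |m| ∣ ((cur + 1) - PySem.Int.mod (cur + 1) m) := (abs_dvd m _).2 hdvd2
      have hcong : |m| ∣ ((e - PySem.Int.mod (cur + 1) m) - (k : Int)) := by
        have heq : (e - PySem.Int.mod (cur + 1) m) - (k : Int) =
            ((e - cur) - ((k : Int) + 1)) + ((cur + 1) - PySem.Int.mod (cur + 1) m) := by ring
        rw [heq]; exact dvd_add hdvd1 hdvd2'
      calc PySem.Int.mod (e - PySem.Int.mod (cur + 1) m) |m|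
          = PySem.Int.mod (k : Int) |m| := pv_mod_congr |m| (by omega) hcong
        _ = (k : Int) := pv_mod_self_of_range _ _ (by left; exact ⟨habs0, by omega, by omega⟩)
    have ih := csLoopA_eq m e hm he k f (PySem.Int.mod (cur + 1) m) hcur' hk' (by omega) (seq ++ [cur])
    have hmap : ∀ i : Nat, PySem.Int.mod (PySem.Int.mod (cur + 1) m + (i : Int)) m
        = PySem.Int.mod (cur + ((i : Int) + 1)) m := by
      intro i
      apply pv_mod_congr m hm
      have := pv_mod_dvd_sub (cur + 1) m
      have heq : (PySem.Int.mod (cur + 1) m + (i : Int)) - (cur + ((i : Int) + 1)) =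
          -((cur + 1) - PySem.Int.mod (cur + 1) m) := by ring
      rw [heq]; exact this.neg_right
    rw [csLoopA, if_neg hne, ih, List.range_succ_eq_map]
    have hAB : (List.range k).map (fun (i : Nat) => PySem.Int.mod (PySem.Int.mod (cur + 1) m + (i : Int)) m)
        = (List.range k).map ((fun (i : Nat) => PySem.Int.mod (cur + (i : Int)) m) ∘ Nat.succ) := by
      apply List.map_congr_left
      intro i _
      simp only [Function.comp_apply]
      rw [hmap i]
      push_cast
      ring_nf
    rw [hAB]
    simp [hc]

-- pyRange 0 n 1 mapped by f, as a map over List.range.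
theorem pv_pyRange_map (n : Int) (hn : 0 ≤ n) (f : Int → Int) :
    (PySem.List.pyRange 0 n 1).map f = (List.range n.toNat).map (fun k => f ((k : Nat) : Int)) := by
  conv_lhs => rw [show n = ((n.toNat : Nat) : Int) by omega]
  rw [PySem.List.pyRange_zero_natCast]
  induction (List.range n.toNat) with
  | nil => simp
  | cons a l ih => simp_all

-- The two ports' body lists coincide.
theorem body_eq (start end_ max_id : Int) (hm : max_id ≠ 0) :
    csLoopA max_id (PySem.Int.mod end_ max_id) (max_id.natAbs + 1) (PySem.Int.mod start max_id) []
      = (PySem.List.pyRange 0 (PySem.Int.mod (PySem.Int.mod end_ max_id - PySem.Int.mod start max_id) |max_id|) 1).map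
          (fun i => PySem.Int.mod (PySem.Int.mod start max_id + i) max_id) := by
  set e := PySem.Int.mod end_ max_id with hedef
  set s := PySem.Int.mod start max_id with hsdef
  have habs0 : (0:Int) < |max_id| := by positivity
  have hn0 : 0 ≤ PySem.Int.mod (e - s) |max_id| := PySem.Int.mod_nonneg (a := e - s) habs0
  have hnlt : PySem.Int.mod (e - s) |max_id| < |max_id| := PySem.Int.mod_lt (a := e - s) habs0
  set n := PySem.Int.mod (e - s) |max_id| with hndef
  have hk : PySem.Int.mod (e - s) |max_id| = ((n.toNat : Nat) : Int) := by omega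
  have hfuel : n.toNat < max_id.natAbs + 1 := by
    have : |max_id| = (max_id.natAbs : Int) := Int.abs_eq_natAbs max_id
    omega
  have he : PySem.Int.mod e max_id = e := pv_mod_idem end_ max_id hm
  have hs : PySem.Int.mod s max_id = s := pv_mod_idem start max_id hm
  rw [csLoopA_eq max_id e hm he n.toNat (max_id.natAbs + 1) s hs hk hfuel []]
  rw [pv_pyRange_map n hn0]
  simp

-- ===== VERDICT (by name: the statement is the Claim_ definition above) =====
theorem circular_sequence_spec : Claim_equal_circular_sequence := by
  intro start end_ max_id include_end _ hpre
  unfold Spec_circular_sequence circular_sequence circular_sequence_alt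
  simp only []
  rw [body_eq start end_ max_id hpre]
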